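-- pv_equiv track=rewrite | github.com/luismeneses988/Challenge_Engeering | Challenge.py | mostFrequentNGram
-- ===== SOURCE A (Python) =====
-- def calculateNGrams(word, n):
--     ngrams = []
--
--     for i in range(0, len(word)):
--         if i + n - 1 < len(word):
--             ngrams.append(word[i:i+n])
--
--     for i in range(len(word) - 1, -1, -1):
--         if i-n >= 0:
--             actual_word = word[i-n+1:i+1]
--
--             add = True
--             for ngram in ngrams:
--                 if ngram == actual_word:
--                     add = False
--
--             if add:
--                 ngrams.append(actual_word)
--
--     return ngrams
--
-- def mostFrequentNGram(word, n):
--     ngrams = calculateNGrams(word, n)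
--     ngrams_freq = []
--
--     for i in range(0, len(ngrams)):
--         ngram = ngrams[i]
--         ngram_count = 1
--
--         for j in range(i+1, len(ngrams)):
--             if ngram == ngrams[j]:
--                 ngram_count += 1
--
--         info = {'ngram' : ngram, 'count' : ngram_count}
--         ngrams_freq.append(info)
--
--     ngram = ''
--     max_repetitions = 0
--     for info in ngrams_freq:
--         if info['count'] > max_repetitions:
--             max_repetitions = info['count']
--             ngram = info['ngram']
--
--     return ngram, max_repetitions
-- ===== SOURCE B (Python) =====
-- def mostFrequentNGram(word, n):
--     counts = {}
--     for i in range(len(word)):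
--         if i + n - 1 < len(word):
--             g = word[i:i+n]
--             counts[g] = counts.get(g, 0) + 1
--     best, best_count = '', 0
--     for g, c in counts.items():
--         if c > best_count:
--             best, best_count = g, c
--     return best, best_count
-- ===== Notes on version B (the rewrite author's own statement) =====
-- stated objective: faster
-- what changed: Replaces A's dedup-building second pass and the O(m^2) nested suffix-count scan with one pass that counts n-grams in a dict (insertion order = first occurrence, so the strict-> max scan keeps A's earliest-first-occurrence tie-break).
import Mathlib
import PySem

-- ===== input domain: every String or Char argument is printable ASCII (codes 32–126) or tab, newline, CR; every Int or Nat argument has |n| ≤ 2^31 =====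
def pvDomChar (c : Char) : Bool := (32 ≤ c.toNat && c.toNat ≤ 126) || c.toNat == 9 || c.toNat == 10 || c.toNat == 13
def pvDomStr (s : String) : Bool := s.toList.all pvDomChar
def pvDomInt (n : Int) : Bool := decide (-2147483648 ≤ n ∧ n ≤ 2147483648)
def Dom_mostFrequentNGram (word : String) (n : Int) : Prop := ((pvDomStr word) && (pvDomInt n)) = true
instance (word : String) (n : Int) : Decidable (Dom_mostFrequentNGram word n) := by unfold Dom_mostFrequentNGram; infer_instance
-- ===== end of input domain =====

-- B replaces A's dedup-building second pass and O(m^2) nested suffix-count scan by a single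
-- counting pass over a dict (insertion order = first occurrence), then one max scan: faster.

-- ===== PORT A =====
-- literal port of calculateNGrams (strings handled as List Char; wrapped to String at the end)
def calculateNGrams (w : List Char) (n : Int) : List (List Char) :=
  let len : Int := PySem.List.len w
  let ngrams := (PySem.List.pyRange 0 len).foldl
    (fun acc i => if i + n - 1 < len then acc ++ [PySem.List.slice w (some i) (some (i + n))] else acc) []
  (PySem.List.pyRange (len - 1) (-1) (-1)).foldl
    (fun acc i =>
      if i - n ≥ 0 then
        let actual := PySem.List.slice w (some (i - n + 1)) (some (i + 1))
        let add := acc.foldl (fun add g => if g == actual then false else add) true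
        if add then acc ++ [actual] else acc
      else acc) ngrams

-- the Python dict {'ngram': g, 'count': c} has two fixed literal keys; ported as the pair (g, c)
def mostFrequentNGram (word : String) (n : Int) : String × Int :=
  let ngrams := calculateNGrams word.toList n
  let freq := (PySem.List.pyRange 0 (PySem.List.len ngrams)).foldl
    (fun acc i =>
      let g := PySem.List.pyGetD ngrams i []
      let c := (PySem.List.pyRange (i + 1) (PySem.List.len ngrams)).foldl
        (fun c j => if g == PySem.List.pyGetD ngrams j [] then c + 1 else c) (1 : Int)
      acc ++ [(g, c)]) []
  let r := freq.foldl
    (fun (st : List Char × Int) info => if info.2 > st.2 then (info.1, info.2) else st) ([], 0)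
  (String.ofList r.1, r.2)

-- ===== PORT B =====
def mostFrequentNGram_alt (word : String) (n : Int) : String × Int :=
  let w := word.toList
  let len : Int := PySem.List.len w
  let counts := (PySem.List.pyRange 0 len).foldl
    (fun (d : PySem.Dict (List Char) Int) i =>
      if i + n - 1 < len then
        let g := PySem.List.slice w (some i) (some (i + n))
        d.insert g (d.getD g 0 + 1)
      else d) PySem.Dict.empty
  let r := counts.items.foldl
    (fun (st : List Char × Int) p => if p.2 > st.2 then (p.1, p.2) else st) ([], 0)
  (String.ofList r.1, r.2)

-- ===== PRECONDITION & SPEC =====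
def Spec_mostFrequentNGram (word : String) (n : Int) (out : String × Int) : Prop := out = mostFrequentNGram_alt word n
instance (word : String) (n : Int) (out : String × Int) : Decidable (Spec_mostFrequentNGram word n out) := by unfold Spec_mostFrequentNGram; infer_instance

-- ===== CLAIM (what is proved, stated in full; the proofs are below) =====
def Claim_equal_mostFrequentNGram : Prop := ∀ (word : String) (n : Int), Dom_mostFrequentNGram word n → Spec_mostFrequentNGram word n (mostFrequentNGram word n)

-- ===== LEMMAS AND PROOFS =====

-- the n-gram at start index i, and the list produced by A's first loop / B's counting loop
def gramF (w : List Char) (n : Int) (i : Int) : List Char :=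
  PySem.List.slice w (some i) (some (i + n))

def grams (w : List Char) (n : Int) : List (List Char) :=
  ((PySem.List.pyRange 0 (PySem.List.len w)).filter
    (fun i => decide (i + n - 1 < PySem.List.len w))).map (gramF w n)

-- the strict-max selection step shared by both final loops
def sel (st : List Char × Int) (p : List Char × Int) : List Char × Int :=
  if p.2 > st.2 then (p.1, p.2) else st

-- a slice with 0 ≤ stop ≤ start is empty
lemma slice_empty (w : List Char) (a b : Int) (ha : 0 ≤ a) (hb : 0 ≤ b) (hba : b ≤ a) :
    PySem.List.slice w (some a) (some b) = [] := by
  have h := PySem.List.length_slice w a b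
  have hc : PySem.List.clampIdx w.length b ≤ PySem.List.clampIdx w.length a := by
    simp only [PySem.List.clampIdx]; split_ifs <;> omega
  exact List.eq_nil_of_length_eq_zero (by omega)

-- for n ≤ 0 the n-gram at the last start index is empty (even with negative-stop wraparound)
lemma gram_last_empty (w : List Char) (n : Int) (hn : n ≤ 0) :
    gramF w n ((w.length : Int) - 1) = [] := by
  have h := PySem.List.length_slice w ((w.length : Int) - 1) ((w.length : Int) - 1 + n)
  have hc : PySem.List.clampIdx w.length ((w.length : Int) - 1 + n) ≤
      PySem.List.clampIdx w.length ((w.length : Int) - 1) := by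
    simp only [PySem.List.clampIdx]; split_ifs <;> omega
  exact List.eq_nil_of_length_eq_zero (by
    simpa [gramF] using (by omega :
      (PySem.List.slice w (some ((w.length : Int) - 1)) (some ((w.length : Int) - 1 + n))).length = 0))

lemma mem_gram (w : List Char) (n : Int) (j : Int) (h0 : 0 ≤ j) (hj : j < (w.length : Int))
    (hc : j + n - 1 < (w.length : Int)) : gramF w n j ∈ grams w n := by
  unfold grams
  refine List.mem_map.2 ⟨j, List.mem_filter.2 ⟨?_, ?_⟩, rfl⟩
  · rw [PySem.List.len_eq]; exact PySem.List.mem_pyRange_one.2 ⟨h0, hj⟩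
  · simp [PySem.List.len_eq]; omega

-- every n-gram produced by A's second (backward) loop is already in grams
lemma mem_grams (w : List Char) (n : Int) (i : Int) (h0 : 0 ≤ i)
    (hlen : i < (w.length : Int)) (hn : 0 ≤ i - n) :
    PySem.List.slice w (some (i - n + 1)) (some (i + 1)) ∈ grams w n := by
  by_cases hpos : 1 ≤ n
  · have : PySem.List.slice w (some (i - n + 1)) (some (i + 1)) = gramF w n (i - n + 1) := by
      unfold gramF; congr 2; omega
    rw [this]
    exact mem_gram w n (i - n + 1) (by omega) (by omega) (by omega)
  · have h1 : PySem.List.slice w (some (i - n + 1)) (some (i + 1)) = [] :=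
      slice_empty w _ _ (by omega) (by omega) (by omega)
    have h2 : gramF w n ((w.length : Int) - 1) = [] := gram_last_empty w n (by omega)
    rw [h1, ← h2]
    exact mem_gram w n _ (by omega) (by omega) (by omega)

-- A's second loop adds nothing when every candidate is already present
lemma second_loop_noop (w : List Char) (n : Int) (l : List Int) :
    ∀ (acc : List (List Char)),
    (∀ i ∈ l, 0 ≤ i - n → PySem.List.slice w (some (i - n + 1)) (some (i + 1)) ∈ acc) →
    l.foldl
      (fun acc i =>
        if i - n ≥ 0 then
          let actual := PySem.List.slice w (some (i - n + 1)) (some (i + 1))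
          let add := acc.foldl (fun add g => if g == actual then false else add) true
          if add then acc ++ [actual] else acc
        else acc) acc = acc := by
  induction l with
  | nil => intro acc _; rfl
  | cons i t ih =>
    intro acc h
    have step :
        (if i - n ≥ 0 then
          let actual := PySem.List.slice w (some (i - n + 1)) (some (i + 1))
          let add := acc.foldl (fun add g => if g == actual then false else add) true
          if add then acc ++ [actual] else acc
        else acc) = acc := by
      by_cases hc : i - n ≥ 0
      · simp only [if_pos hc]
        have hmem := h i (List.mem_cons_self) hc
        have : acc.foldl (fun add g => if g == PySem.List.slice w (some (i - n + 1)) (some (i + 1)) then false else add) true = false := by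
          rw [PySem.List.foldl_if_false_eq]
          simp only [Bool.true_and, Bool.not_eq_false']
          exact List.any_eq_true.2 ⟨_, hmem, by simp⟩
        simp only [this]
        simp
      · exact if_neg hc
    simp only [List.foldl_cons, step]
    exact ih acc (fun j hj => h j (List.mem_cons_of_mem _ hj))

lemma calculateNGrams_eq (w : List Char) (n : Int) : calculateNGrams w n = grams w n := by
  unfold calculateNGrams
  have h1 : (PySem.List.pyRange 0 (PySem.List.len w)).foldl
      (fun acc i => if i + n - 1 < PySem.List.len w then acc ++ [PySem.List.slice w (some i) (some (i + n))] else acc) []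
      = grams w n := by
    rw [PySem.List.foldl_append_ite (fun i => i + n - 1 < PySem.List.len w)
      (fun i => PySem.List.slice w (some i) (some (i + n)))]
    rfl
  simp only [h1]
  apply second_loop_noop
  intro i hi hn
  have hmem : 0 ≤ i ∧ i < (w.length : Int) := by
    rw [PySem.List.len_eq, PySem.List.pyRange_neg_one] at hi
    rcases List.mem_map.1 hi with ⟨k, hk, rfl⟩
    rw [List.mem_range] at hk
    omega
  exact mem_grams w n i hmem.1 hmem.2 hn

-- A's frequency table, structurally: each element paired with 1 + its count in the strict suffix
def pairsA : List (List Char) → List (List Char × Int)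
  | [] => []
  | x :: xs => (x, 1 + (xs.count x : Int)) :: pairsA xs

lemma length_pairsA (l : List (List Char)) : (pairsA l).length = l.length := by
  induction l with
  | nil => rfl
  | cons x xs ih => simp [pairsA, ih]

lemma getElem_pairsA (l : List (List Char)) (k : Nat) (hk : k < (pairsA l).length) :
    (pairsA l)[k] = (l.getD k [], 1 + (((l.drop (k + 1)).count (l.getD k [])) : Int)) := by
  induction l generalizing k with
  | nil => simp [pairsA] at hk
  | cons x xs ih =>
    cases k with
    | zero => simp [pairsA]
    | succ m =>
      simp only [pairsA, List.getElem_cons_succ, List.getD_cons_succ, List.drop_succ_cons]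
      exact ih m (by simpa [pairsA] using hk)

-- A's inner counting loop over indices a..len-1 counts occurrences in the suffix from a
lemma count_loop (l : List (List Char)) (g : List Char) :
    ∀ (m a : Nat), a + m = l.length → ∀ (c0 : Int),
    (PySem.List.pyRange (a : Int) (PySem.List.len l)).foldl
      (fun c j => if g == PySem.List.pyGetD l j [] then c + 1 else c) c0
    = c0 + (((l.drop a).count g) : Int) := by
  intro m
  induction m with
  | zero =>
    intro a ha c0
    rw [PySem.List.len_eq, PySem.List.pyRange_one_eq_nil (by omega)]
    simp [List.drop_of_length_le (by omega : l.length ≤ a)]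
  | succ m ih =>
    intro a ha c0
    have hlt : a < l.length := by omega
    rw [PySem.List.len_eq, PySem.List.pyRange_one_cons (by exact_mod_cast hlt)]
    simp only [List.foldl_cons]
    have hcast : ((a : Int) + 1) = ((a + 1 : Nat) : Int) := by push_cast; ring
    rw [hcast, ← PySem.List.len_eq, ih (a + 1) (by omega)]
    rw [PySem.List.pyGetD_natCast, List.getD_eq_getElem l [] hlt]
    have hcnt : ((List.drop a l).count g) = (List.drop (a+1) l).count g + (if l[a] == g then 1 else 0) := by
      rw [List.drop_eq_getElem_cons hlt, List.count_cons]
    by_cases hg : g = l[a]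
    · rw [if_pos (by simp [hg]), hcnt, if_pos (by simp [hg])]
      push_cast; ring
    · rw [if_neg (by simp [hg]), hcnt, if_neg (by simp; exact fun h => hg h.symm)]
      simp

-- A's frequency-building loop produces exactly pairsA
lemma freq_eq (l : List (List Char)) :
    (PySem.List.pyRange 0 (PySem.List.len l)).foldl
      (fun acc i =>
        let g := PySem.List.pyGetD l i []
        let c := (PySem.List.pyRange (i + 1) (PySem.List.len l)).foldl
          (fun c j => if g == PySem.List.pyGetD l j [] then c + 1 else c) (1 : Int)
        acc ++ [(g, c)]) []
    = pairsA l := by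
  rw [PySem.List.foldl_append_singleton_eq_map
    (fun i => (PySem.List.pyGetD l i [],
      (PySem.List.pyRange (i + 1) (PySem.List.len l)).foldl
        (fun c j => if PySem.List.pyGetD l i [] == PySem.List.pyGetD l j [] then c + 1 else c) (1 : Int)))]
  simp only [List.nil_append]
  apply List.ext_getElem
  · simp [PySem.List.length_pyRange_one, PySem.List.len_eq, length_pairsA]
  · intro k h1 h2
    rw [List.getElem_map, PySem.List.getElem_pyRange_one, getElem_pairsA l k (by simpa [length_pairsA] using h2)]
    have hk : k < l.length := by simpa [length_pairsA] using h2
    have hz : ((0 : Int) + k) = (k : Int) := by ring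
    have hcast : ((k : Int) + 1) = ((k + 1 : Nat) : Int) := by push_cast; ring
    simp only [hz, hcast, PySem.List.pyGetD_natCast]
    rw [count_loop l (l.getD k []) (l.length - (k+1)) (k+1) (by omega) 1]

-- first occurrences of l not already in c, in order (the shape of Set.ofList with accumulator c)
def firsts (c : List (List Char)) : List (List Char) → List (List Char)
  | [] => []
  | x :: xs => if x ∈ c then firsts c xs else x :: firsts (c ++ [x]) xs

def itemsFrom (c : List (List Char)) : List (List Char) → List (List Char × Int)
  | [] => []
  | x :: xs => if x ∈ c then itemsFrom c xs else (x, 1 + (xs.count x : Int)) :: itemsFrom (c ++ [x]) xs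

lemma ofList_acc (xs : List (List Char)) :
    ∀ (c : List (List Char)), xs.foldl PySem.Set.add c = c ++ firsts c xs := by
  induction xs with
  | nil => intro c; simp [firsts]
  | cons x t ih =>
    intro c
    simp only [List.foldl_cons, firsts]
    by_cases hx : x ∈ c
    · rw [if_pos hx]
      have : PySem.Set.add c x = c := by simp [PySem.Set.add, hx]
      rw [this, ih c]
    · rw [if_neg hx]
      have : PySem.Set.add c x = c ++ [x] := by simp [PySem.Set.add, hx]
      rw [this, ih (c ++ [x]), List.append_assoc]
      rfl

lemma mem_firsts_not_seen (xs : List (List Char)) :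
    ∀ (c : List (List Char)) (x : List Char), x ∈ firsts c xs → x ∉ c := by
  induction xs with
  | nil => intro c x hx; simp [firsts] at hx
  | cons y t ih =>
    intro c x hx
    by_cases hy : y ∈ c
    · exact ih c x (by simpa [firsts, if_pos hy] using hx)
    · rw [firsts, if_neg hy] at hx
      rcases List.mem_cons.1 hx with rfl | hx'
      · exact hy
      · intro hc; exact ih (c ++ [y]) x hx' (List.mem_append_left _ hc)

lemma itemsFrom_eq_map (xs : List (List Char)) :
    ∀ (c : List (List Char)), itemsFrom c xs = (firsts c xs).map (fun k => (k, (xs.count k : Int))) := by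
  induction xs with
  | nil => intro c; simp [itemsFrom, firsts]
  | cons x t ih =>
    intro c
    by_cases hx : x ∈ c
    · rw [itemsFrom, if_pos hx, firsts, if_pos hx, ih c]
      apply List.map_congr_left
      intro k hk
      have hkc := mem_firsts_not_seen t c k hk
      have : k ≠ x := fun h => hkc (h ▸ hx)
      simp [Ne.symm this]
    · rw [itemsFrom, if_neg hx, firsts, if_neg hx, List.map_cons, ih (c ++ [x])]
      congr 1
      · simp; ring
      · apply List.map_congr_left
        intro k hk
        have hkc := mem_firsts_not_seen t (c ++ [x]) k hk
        have : k ≠ x := fun h => hkc (List.mem_append_right _ (by simp [h]))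
        simp [Ne.symm this]

-- the key invariant: the strict-max scan ignores non-first occurrences, so scanning pairsA
-- equals scanning the per-distinct-element items, for any state dominating the seen counts
lemma sel_key (xs : List (List Char)) :
    ∀ (c : List (List Char)) (b : List Char) (m : Int),
    (∀ x ∈ c, ((xs.count x : Int)) ≤ m) →
    (pairsA xs).foldl sel (b, m) = (itemsFrom c xs).foldl sel (b, m) := by
  induction xs with
  | nil => intro c b m _; rfl
  | cons x t ih =>
    intro c b m hm
    by_cases hx : x ∈ c
    · rw [pairsA, itemsFrom, if_pos hx, List.foldl_cons]
      have hle : (1 : Int) + (t.count x : Int) ≤ m := by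
        have := hm x hx
        simp [List.count_cons_self] at this
        omega
      have : sel (b, m) (x, 1 + (t.count x : Int)) = (b, m) := by
        simp [sel]; omega
      rw [this]
      exact ih c b m (fun y hy => le_trans (by exact_mod_cast Nat.cast_le.2 (List.count_le_count_cons (l := t) (a := y) (b := x))) (hm y hy))
    · rw [pairsA, itemsFrom, if_neg hx, List.foldl_cons, List.foldl_cons]
      rcases hst : sel (b, m) (x, 1 + (t.count x : Int)) with ⟨b', m'⟩
      have hm' : m ≤ m' ∧ 1 + (t.count x : Int) ≤ m' := by
        simp only [sel] at hst
        split_ifs at hst with hgt <;> cases hst <;> constructor <;> omega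
      apply ih (c ++ [x]) b' m'
      intro y hy
      rcases List.mem_append.1 hy with hyc | hyx
      · calc ((t.count y : Nat) : Int) ≤ ((x :: t).count y : Int) := by exact_mod_cast List.count_le_count_cons
          _ ≤ m := hm y hyc
          _ ≤ m' := hm'.1
      · have : y = x := by simpa using hyx
        subst this
        exact le_trans (by omega) hm'.2

-- B's dict is the counter of the gram list
lemma counts_eq (w : List Char) (n : Int) :
    ((PySem.List.pyRange 0 (PySem.List.len w)).foldl
      (fun (d : PySem.Dict (List Char) Int) i =>
        if i + n - 1 < PySem.List.len w then
          let g := PySem.List.slice w (some i) (some (i + n))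
          d.insert g (d.getD g 0 + 1)
        else d) PySem.Dict.empty).items = itemsFrom [] (grams w n) := by
  rw [PySem.List.foldl_ite_eq_foldl_filter (fun i => i + n - 1 < PySem.List.len w)
    (fun (d : PySem.Dict (List Char) Int) i =>
      d.insert (PySem.List.slice w (some i) (some (i + n)))
        (d.getD (PySem.List.slice w (some i) (some (i + n))) 0 + 1))]
  have hmap : ((PySem.List.pyRange 0 (PySem.List.len w)).filter
        (fun i => decide (i + n - 1 < PySem.List.len w))).foldl
      (fun (d : PySem.Dict (List Char) Int) i =>
        d.insert (PySem.List.slice w (some i) (some (i + n)))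
          (d.getD (PySem.List.slice w (some i) (some (i + n))) 0 + 1)) PySem.Dict.empty
      = (grams w n).foldl (fun (d : PySem.Dict (List Char) Int) g => d.insert g (d.getD g 0 + 1)) PySem.Dict.empty := by
    unfold grams
    rw [List.foldl_map]
    rfl
  rw [hmap, PySem.Dict.foldl_insert_getD_add_one_eq_counter, PySem.Dict.items_counter,
    itemsFrom_eq_map]
  have : PySem.Set.ofList (grams w n) = firsts [] (grams w n) := by
    unfold PySem.Set.ofList
    rw [ofList_acc]
    rfl
  rw [this]

-- ===== VERDICT (by name: the statement is the Claim_ definition above) =====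
theorem mostFrequentNGram_spec : Claim_equal_mostFrequentNGram := by
  intro word n _
  show mostFrequentNGram word n = mostFrequentNGram_alt word n
  unfold mostFrequentNGram mostFrequentNGram_alt
  simp only [calculateNGrams_eq, freq_eq, counts_eq]
  have hsel1 : (fun (st : List Char × Int) (info : List Char × Int) =>
      if info.2 > st.2 then (info.1, info.2) else st) = sel := rfl
  rw [hsel1, sel_key (grams word.toList n) [] [] 0 (by intro x hx; simp at hx)]
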